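-- pv_equiv track=rewrite | github.com/sylviasolo/Optimal_Strategies_in_RCV | utils.py | get_new_dict
-- ===== SOURCE A (Python) =====
-- def get_new_dict(my_dict):
--     new_dict = {}
--
--     # Iterate through the keys and values in my_dict
--     for key, value in my_dict.items():
--         # Generate all possible substrings of the key
--         substrings = [key[:i+1] for i in range(len(key))]
--
--         # Update the new_dict with the aggregated values for each substring
--         for substring in substrings:
--             new_dict[substring] = new_dict.get(substring, 0) + value
--
--     # Filter out keys with zero counts
--     final_dict = {x: y for x, y in new_dict.items() if y > 0}
--     return final_dict
-- ===== SOURCE B (Python) =====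
-- def get_new_dict(my_dict):
--     # Phase 1: enumerate the distinct nonempty prefixes in first-occurrence order.
--     prefixes = []
--     seen = set()
--     for key in my_dict:
--         for i in range(1, len(key) + 1):
--             p = key[:i]
--             if p not in seen:
--                 seen.add(p)
--                 prefixes.append(p)
--     # Index the items by first character: a prefix can only match keys in its bucket.
--     buckets = {}
--     for k, v in my_dict.items():
--         buckets.setdefault(k[:1], []).append((k, v))
--     # Phase 2: answer each prefix with an independent startswith filter-and-sum
--     # query over its bucket; keep it only when the total is positive.
--     result = {}
--     for p in prefixes:
--         total = sum(v for k, v in buckets.get(p[:1], []) if k.startswith(p))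
--         if total > 0:
--             result[p] = total
--     return result
-- ===== Notes on version B (the rewrite author's own statement) =====
-- stated objective: alternative
-- what changed: A generates prefixes per key and incrementally accumulates running totals in a dict with get-default; B instead first enumerates the distinct nonempty prefixes in first-occurrence order, builds a first-character bucket index of the items, and then answers each prefix with an independent startswith filter-and-sum query over its bucket (aggregate-by-update replaced by enumerate-then-query).
import Mathlib
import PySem

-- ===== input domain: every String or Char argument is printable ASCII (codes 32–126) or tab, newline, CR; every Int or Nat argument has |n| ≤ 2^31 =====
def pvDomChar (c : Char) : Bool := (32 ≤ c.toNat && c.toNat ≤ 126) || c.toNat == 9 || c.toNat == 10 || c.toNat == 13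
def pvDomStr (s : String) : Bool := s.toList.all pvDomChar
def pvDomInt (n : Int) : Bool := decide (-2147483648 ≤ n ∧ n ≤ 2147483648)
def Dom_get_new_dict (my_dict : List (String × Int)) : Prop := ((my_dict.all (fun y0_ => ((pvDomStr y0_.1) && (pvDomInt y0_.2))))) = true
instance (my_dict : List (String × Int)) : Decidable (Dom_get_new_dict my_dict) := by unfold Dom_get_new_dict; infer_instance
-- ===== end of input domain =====

-- B replaces A's running-total accumulation with enumerate-then-query: first list the
-- distinct nonempty prefixes in first-occurrence order, then answer each prefix with
-- an independent startswith filter-and-sum query over a first-character bucket index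
-- of the items (objective: alternative).

-- ===== PORT A =====
def get_new_dict (my_dict : List (String × Int)) : List (String × Int) :=
  let new_dict := my_dict.foldl (fun d kv =>
      let substrings := (PySem.List.pyRange 0 (PySem.Str.len kv.1) 1).map
        (fun i => PySem.Str.slice kv.1 none (some (i + 1)))
      substrings.foldl (fun d s => d.insert s (d.getD s 0 + kv.2)) d)
    PySem.Dict.empty
  let final_dict := new_dict.items.foldl
      (fun fd p => if p.2 > 0 then fd.insert p.1 p.2 else fd) PySem.Dict.empty
  final_dict.items

-- ===== PORT B =====
def get_new_dict_alt (my_dict : List (String × Int)) : List (String × Int) :=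
  -- phase 1: distinct nonempty prefixes in first-occurrence order (list + seen set)
  let st := my_dict.foldl (fun (st : List String × PySem.Set String) kv =>
      (PySem.List.pyRange 1 (PySem.Str.len kv.1 + 1) 1).foldl (fun st i =>
        let p := PySem.Str.slice kv.1 none (some i)
        if PySem.Set.contains st.2 p then st
        else (st.1 ++ [p], PySem.Set.add st.2 p)) st)
    ([], PySem.Set.ofList [])
  -- index the items by first character: a prefix can only match keys in its bucket
  let buckets := my_dict.foldl (fun (b : PySem.Dict String (List (String × Int))) kv =>
      b.modify (PySem.Str.slice kv.1 none (some 1)) [] (fun l => l ++ [kv])) PySem.Dict.empty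
  -- phase 2: one independent startswith filter-and-sum query per distinct prefix
  let res := st.1.foldl (fun fd p =>
      let total : Int := (((buckets.getD (PySem.Str.slice p none (some 1)) []).filter
          (fun kv => PySem.Str.startswith kv.1 p)).map (·.2)).sum
      if total > 0 then fd.insert p total else fd) (PySem.Dict.empty : PySem.Dict String Int)
  res.items

-- ===== PRECONDITION & SPEC =====
def Spec_get_new_dict (my_dict : List (String × Int)) (out : List (String × Int)) : Prop := out = get_new_dict_alt my_dict
instance (my_dict : List (String × Int)) (out : List (String × Int)) : Decidable (Spec_get_new_dict my_dict out) := by unfold Spec_get_new_dict; infer_instance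

-- ===== CLAIM (what is proved, stated in full; the proofs are below) =====
def Claim_equal_get_new_dict : Prop := ∀ (my_dict : List (String × Int)), Dom_get_new_dict my_dict → Spec_get_new_dict my_dict (get_new_dict my_dict)

-- ===== LEMMAS AND PROOFS =====

-- A's per-key prefix list
def pvPrefsA (s : String) : List String :=
  (PySem.List.pyRange 0 (PySem.Str.len s) 1).map
    (fun i => PySem.Str.slice s none (some (i + 1)))

-- B's per-key prefix list
def pvPrefsB (s : String) : List String :=
  (PySem.List.pyRange 1 (PySem.Str.len s + 1) 1).map
    (fun i => PySem.Str.slice s none (some i))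

theorem pvPrefsB_eq_pvPrefsA (s : String) : pvPrefsB s = pvPrefsA s := by
  unfold pvPrefsA pvPrefsB
  rw [PySem.List.pyRange_one, PySem.List.pyRange_one]
  simp only [add_sub_cancel_right, sub_zero, List.map_map]
  refine List.map_congr_left (fun k _ => ?_)
  simp only [Function.comp]
  ring_nf

-- the flattened (prefix, value) stream A's nested loop walks
def pvPairs (my_dict : List (String × Int)) : List (String × Int) :=
  my_dict.flatMap (fun kv => (pvPrefsA kv.1).map (fun p => (p, kv.2)))

-- the running value A's accumulator dict holds at k is the total of pair values at key k
theorem pv_getD_foldl_insert_add (pairs : List (String × Int)) (d : PySem.Dict String Int) (k : String) :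
    (pairs.foldl (fun d p => d.insert p.1 (d.getD p.1 0 + p.2)) d).getD k 0
      = d.getD k 0 + ((pairs.filter (fun q => q.1 == k)).map (·.2)).sum := by
  induction pairs generalizing d with
  | nil => simp
  | cons q rest ih =>
    simp only [List.foldl_cons, List.filter_cons]
    rw [ih]
    by_cases h : q.1 = k
    · simp [h]; ring
    · rw [PySem.Dict.getD_insert, if_neg (fun hk => h hk.symm)]
      simp only [beq_iff_eq, h, if_false]

-- B's phase-1 loop, started with list = seen-set, keeps them equal and computes Set.update
theorem pv_phase1 (ps : List String) (s : PySem.Set String) :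
    ps.foldl (fun st p => if PySem.Set.contains st.2 p then st
        else (st.1 ++ [p], PySem.Set.add st.2 p)) (s, s)
      = (PySem.Set.update s ps, PySem.Set.update s ps) := by
  induction ps generalizing s with
  | nil => simp [PySem.Set.update]
  | cons p rest ih =>
    simp only [List.foldl_cons, PySem.Set.update_cons]
    by_cases h : p ∈ s
    · rw [if_pos (by simpa [PySem.Set.contains_iff] using h), PySem.Set.add_of_mem h, ih]
    · rw [if_neg (by simpa [PySem.Set.contains_iff] using h), ← PySem.Set.add_of_not_mem h, ih]

-- every prefix in the stream is nonempty
theorem pv_mem_prefsA_ne_nil (s k : String) (h : k ∈ pvPrefsA s) : k.toList ≠ [] := by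
  unfold pvPrefsA at h
  rw [List.mem_map] at h
  obtain ⟨i, hi, hk⟩ := h
  rw [PySem.List.mem_pyRange_one] at hi
  rw [PySem.Str.len_eq] at hi
  subst hk
  simp only [PySem.Str.toList_slice, PySem.Chars.slice_eq_listSlice]
  rw [PySem.List.slice_to _ (by omega)]
  simp only [ne_eq, List.take_eq_nil_iff, not_or]
  refine ⟨by omega, fun hnil => ?_⟩
  rw [hnil] at hi
  simp at hi
  omega

-- count of k among the prefixes of s: 1 exactly when s starts with the nonempty k
theorem pv_count_prefsA (s k : String) (hk : k.toList ≠ []) :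
    (pvPrefsA s).count k = if PySem.Str.startswith s k then 1 else 0 := by
  unfold pvPrefsA
  rw [PySem.List.pyRange_one]
  simp only [sub_zero, List.map_map, PySem.Str.len_eq, Int.toNat_natCast]
  rw [List.count_eq_countP, List.countP_map]
  have hpred : ∀ j : Nat, (((fun x => x == k) ∘ (fun i => PySem.Str.slice s none (some (i + 1))) ∘
      (fun j : Nat => (0 : Int) + j)) j = true) ↔ s.toList.take (j + 1) = k.toList := by
    intro j
    simp only [Function.comp, zero_add, beq_iff_eq]
    have h1 : ((j : Int) + 1) = ((j + 1 : Nat) : Int) := by push_cast; ring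
    rw [h1, ← String.toList_inj]
    simp only [PySem.Str.toList_slice, PySem.Chars.slice_eq_listSlice,
      PySem.List.slice_to_natCast]
  rw [List.countP_congr (q := fun j => decide (s.toList.take (j + 1) = k.toList))
    (fun j _ => by rw [hpred j]; simp)]
  by_cases hp : k.toList <+: s.toList
  · have hkl : 0 < k.toList.length := List.length_pos_iff.mpr hk
    have hle : k.toList.length ≤ s.toList.length := hp.length_le
    have hsw : PySem.Str.startswith s k = true := by
      rw [PySem.Str.startswith_eq]
      exact (PySem.Chars.startswith_iff _ _).mpr hp
    rw [hsw, if_pos rfl]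
    rw [List.countP_congr (q := fun j => j == k.toList.length - 1) (fun j hj => by
      rw [List.mem_range] at hj
      simp only [decide_eq_true_eq, beq_iff_eq]
      constructor
      · intro hEq
        have hlen := congrArg List.length hEq
        rw [List.length_take] at hlen
        omega
      · intro hj0
        subst hj0
        rw [Nat.sub_add_cancel hkl, ← List.prefix_iff_eq_take.mp hp])]
    rw [← List.count_eq_countP]
    exact List.count_eq_one_of_mem List.nodup_range (by rw [List.mem_range]; omega)
  · have hsw : PySem.Str.startswith s k = false := by
      rw [PySem.Str.startswith_eq, Bool.eq_false_iff]
      intro h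
      exact hp ((PySem.Chars.startswith_iff _ _).mp h)
    rw [hsw]
    simp only [Bool.false_eq_true, if_false]
    apply List.countP_eq_zero.mpr
    intro j hj
    simp only [decide_eq_true_eq]
    intro hEq
    exact hp (hEq ▸ List.take_prefix _ _)

-- total of the pair-stream values at key k = total over the keys that start with k
theorem pv_sum_eq (my_dict : List (String × Int)) (k : String) (hk : k.toList ≠ []) :
    (((pvPairs my_dict).filter (fun q => q.1 == k)).map (·.2)).sum
      = ((my_dict.filter (fun kv => PySem.Str.startswith kv.1 k)).map (·.2)).sum := by
  induction my_dict with
  | nil => simp [pvPairs]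
  | cons kv rest ih =>
    have hhead : ((((pvPrefsA kv.1).map (fun p => (p, kv.2))).filter
        (fun q => q.1 == k)).map (·.2)).sum
        = if PySem.Str.startswith kv.1 k then kv.2 else 0 := by
      rw [List.filter_map, List.map_map]
      have hc : ((fun (q : String × Int) => q.1 == k) ∘ fun p => (p, kv.2))
          = fun p => p == k := rfl
      have hm : ((fun (q : String × Int) => q.2) ∘ fun p => (p, kv.2))
          = fun _ : String => kv.2 := rfl
      rw [hc, hm, PySem.List.sum_map_const_int, ← List.countP_eq_length_filter,
        ← List.count_eq_countP, pv_count_prefsA kv.1 k hk]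
      split <;> simp
    simp only [pvPairs, List.flatMap_cons, List.filter_append, List.map_append,
      List.sum_append, List.filter_cons]
    rw [show (rest.flatMap (fun kv => (pvPrefsA kv.1).map (fun p => (p, kv.2)))) =
      pvPairs rest from rfl, ih, hhead]
    by_cases h : PySem.Chars.startswith kv.1.toList k.toList
    · simp [PySem.Str.startswith_eq, h]
    · simp [PySem.Str.startswith_eq, h]

-- the first-character bucket at c holds exactly the items whose key starts with c
theorem pv_bucket_getD (my_dict : List (String × Int)) (c : String) :
    (my_dict.foldl (fun (b : PySem.Dict String (List (String × Int))) kv =>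
        b.modify (PySem.Str.slice kv.1 none (some 1)) [] (fun l => l ++ [kv]))
      PySem.Dict.empty).getD c []
    = my_dict.filter (fun kv => PySem.Str.slice kv.1 none (some 1) == c) := by
  have h1 : my_dict.foldl (fun (b : PySem.Dict String (List (String × Int))) kv =>
        b.modify (PySem.Str.slice kv.1 none (some 1)) [] (fun l => l ++ [kv]))
        PySem.Dict.empty
      = (my_dict.map (fun kv => (PySem.Str.slice kv.1 none (some 1), kv))).foldl
          (fun d q => d.modify q.1 [] (fun l => l ++ [q.2])) PySem.Dict.empty := by
    rw [List.foldl_map]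
  rw [h1, PySem.Dict.getD_foldl_modify_append, List.filter_map, List.map_map]
  simp [Function.comp_def]

-- once a key is known to start with the nonempty prefix p, the first-char test is redundant
theorem pv_first_filter (p : String) (hp : p.toList ≠ []) (l : List (String × Int)) :
    (l.filter (fun kv => PySem.Str.slice kv.1 none (some 1)
        == PySem.Str.slice p none (some 1))).filter
      (fun kv => PySem.Str.startswith kv.1 p)
    = l.filter (fun kv => PySem.Str.startswith kv.1 p) := by
  rw [List.filter_filter]
  refine List.filter_congr (fun kv _ => ?_)
  by_cases hsw : PySem.Str.startswith kv.1 p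
  · have hpre : p.toList <+: kv.1.toList := by
      rw [PySem.Str.startswith_eq] at hsw
      exact (PySem.Chars.startswith_iff _ _).mp hsw
    have hfirst : PySem.Str.slice kv.1 none (some 1) = PySem.Str.slice p none (some 1) := by
      rw [← String.toList_inj]
      simp only [PySem.Str.toList_slice, PySem.Chars.slice_eq_listSlice]
      rw [PySem.List.slice_to _ (by norm_num), PySem.List.slice_to _ (by norm_num)]
      obtain ⟨t, ht⟩ := hpre
      cases hcs : p.toList with
      | nil => exact absurd hcs hp
      | cons a rest => rw [← ht, hcs]; rfl
    simp [hfirst]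
  · have hsw' : PySem.Chars.startswith kv.1.toList p.toList = false := by
      rw [PySem.Str.startswith_eq] at hsw
      exact Bool.eq_false_iff.mpr hsw
    simp [hsw']

theorem get_new_dict_eq (my_dict : List (String × Int)) :
    get_new_dict my_dict = get_new_dict_alt my_dict := by
  unfold get_new_dict get_new_dict_alt
  simp only []
  -- A's nested accumulation loop is one fold over the flattened pair stream
  have hflatA : (my_dict.foldl (fun d kv =>
        ((PySem.List.pyRange 0 (PySem.Str.len kv.1) 1).map
          (fun i => PySem.Str.slice kv.1 none (some (i + 1)))).foldl
          (fun d s => d.insert s (d.getD s 0 + kv.2)) d)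
        (PySem.Dict.empty : PySem.Dict String Int))
      = (pvPairs my_dict).foldl (fun d p => d.insert p.1 (d.getD p.1 0 + p.2))
          PySem.Dict.empty := by
    rw [pvPairs, List.foldl_flatMap]
    refine PySem.List.foldl_congr_mem _ _ _ _ (fun d kv _ => ?_)
    simp only [pvPrefsA, List.foldl_map]
  rw [hflatA]
  -- B's phase 1 is the ordered dedup of the same prefix stream
  have hstream : my_dict.flatMap (fun kv => pvPrefsA kv.1)
      = (pvPairs my_dict).map (·.1) := by
    rw [pvPairs, List.map_flatMap]
    simp only [List.map_map]
    simp [Function.comp_def]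
  have hflatB : (my_dict.foldl (fun (st : List String × PySem.Set String) kv =>
        (PySem.List.pyRange 1 (PySem.Str.len kv.1 + 1) 1).foldl (fun st i =>
          let p := PySem.Str.slice kv.1 none (some i)
          if PySem.Set.contains st.2 p then st
          else (st.1 ++ [p], PySem.Set.add st.2 p)) st)
        ([], PySem.Set.ofList []))
      = (PySem.Set.ofList ((pvPairs my_dict).map (·.1)),
         PySem.Set.ofList ((pvPairs my_dict).map (·.1))) := by
    have h1 : (my_dict.foldl (fun (st : List String × PySem.Set String) kv =>
          (PySem.List.pyRange 1 (PySem.Str.len kv.1 + 1) 1).foldl (fun st i =>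
            let p := PySem.Str.slice kv.1 none (some i)
            if PySem.Set.contains st.2 p then st
            else (st.1 ++ [p], PySem.Set.add st.2 p)) st)
          ([], PySem.Set.ofList []))
        = (my_dict.flatMap (fun kv => pvPrefsA kv.1)).foldl
            (fun (st : List String × PySem.Set String) p =>
              if PySem.Set.contains st.2 p then st
              else (st.1 ++ [p], PySem.Set.add st.2 p)) ([], PySem.Set.ofList []) := by
      rw [List.foldl_flatMap]
      refine PySem.List.foldl_congr_mem _ _ _ _ (fun st kv _ => ?_)
      rw [← pvPrefsB_eq_pvPrefsA, pvPrefsB, List.foldl_map]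
    rw [h1, hstream]
    have := pv_phase1 ((pvPairs my_dict).map (·.1)) (PySem.Set.ofList [])
    simpa [PySem.Set.update_empty] using this
  rw [hflatB]
  simp only []
  -- A's dict has the same key list, with each key's value the pair-stream total
  set nd := (pvPairs my_dict).foldl (fun d p => d.insert p.1 (d.getD p.1 0 + p.2))
      (PySem.Dict.empty : PySem.Dict String Int) with hnd
  have hnodup : nd.keys.Nodup :=
    PySem.Dict.nodup_keys_foldl_insert_key (pvPairs my_dict) (·.1)
      (fun d p => d.getD p.1 0 + p.2) PySem.Dict.empty (by simp)
  have hkeys : nd.keys = PySem.Set.ofList ((pvPairs my_dict).map (·.1)) := by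
    rw [hnd, PySem.Dict.keys_foldl_insert_key (pvPairs my_dict) (·.1)
      (fun d p => d.getD p.1 0 + p.2)]
    rfl
  rw [PySem.Dict.items_eq_map_keys nd hnodup 0, hkeys, List.foldl_map]
  congr 1
  refine PySem.List.foldl_congr_mem _ _ _ _ (fun fd k hkmem => ?_)
  have hkne : k.toList ≠ [] := by
    have hmem : k ∈ (pvPairs my_dict).map (·.1) :=
      (PySem.Set.mem_ofList (xs := (pvPairs my_dict).map (·.1)) (y := k)).mp hkmem
    rw [← hstream, List.mem_flatMap] at hmem
    obtain ⟨kv, _, hp⟩ := hmem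
    exact pv_mem_prefsA_ne_nil kv.1 k hp
  have hval : nd.getD k 0
      = ((my_dict.filter (fun kv => PySem.Str.startswith kv.1 k)).map (·.2)).sum := by
    rw [hnd, pv_getD_foldl_insert_add]
    simp [pv_sum_eq my_dict k hkne]
  rw [hval, pv_bucket_getD, pv_first_filter k hkne]

-- ===== VERDICT (by name: the statement is the Claim_ definition above) =====
theorem get_new_dict_spec : Claim_equal_get_new_dict := by
  intro my_dict _
  exact get_new_dict_eq my_dict
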